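-- pv_equiv track=rewrite | github.com/blindfrequency/athenaeum | mods/lib/Octaves.py | findGroupsByPattern
-- ===== SOURCE A (Python) =====
-- def listToStr(scaleList):
--     result = ''
--     for el in scaleList:
--         result += str(el) + ' '
--     return result
--
-- def findGroupsByPattern(sourceList, patternList):
--     groups = []
--     groupNumbers = {}
--     groupCounter = 0
--     newGroup = []
--     templateStr = listToStr(patternList)
--     prevBeginInd = 0
--     for i in range(len(sourceList) - len(patternList)):
--         subList = sourceList[i:len(patternList)+i] #check it
--         subStr = listToStr(subList)
--         if templateStr == subStr:
--             #from prevBeginInd to i-1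
--             group = sourceList[prevBeginInd:i-1]
--             groupStr = listToStr(group)
--             prevBeginInd = i
--             currentGroupInd = 0
--             if groupNumbers.get(groupStr) != None:
--                 currentGroupInd = groupNumbers[groupStr]
--             else:
--                 currentGroupInd = groupCounter
--                 groupNumbers[groupStr] = groupCounter
--                 groupCounter += 1
--             groups.append(currentGroupInd)
--     return groups, groupNumbers
-- ===== SOURCE B (Python) =====
-- def findGroupsByPattern(sourceList, patternList):
--     n, m = len(sourceList), len(patternList)
--     # phase 1: occurrence positions, checked element by element with early exit
--     positions = []
--     for i in range(n - m):
--         j = 0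
--         while j < m and sourceList[i + j] == patternList[j]:
--             j += 1
--         if j == m:
--             positions.append(i)
--     # phase 2: group the gap segments between consecutive occurrences
--     groups = []
--     groupNumbers = {}
--     prev = 0
--     for i in positions:
--         key = ''.join('%d ' % x for x in sourceList[prev:i - 1])
--         if key not in groupNumbers:
--             groupNumbers[key] = len(groupNumbers)
--         groups.append(groupNumbers[key])
--         prev = i
--     return groups, groupNumbers
-- ===== Notes on version B (the rewrite author's own statement) =====
-- stated objective: faster
-- what changed: A stringifies every length-m window and compares strings while grouping inline; B first finds occurrence positions by direct element-by-element comparison with early exit (no string building), then groups the gap segments in a separate linear pass keyed by len(groupNumbers) instead of a separate counter.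
import Mathlib
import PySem

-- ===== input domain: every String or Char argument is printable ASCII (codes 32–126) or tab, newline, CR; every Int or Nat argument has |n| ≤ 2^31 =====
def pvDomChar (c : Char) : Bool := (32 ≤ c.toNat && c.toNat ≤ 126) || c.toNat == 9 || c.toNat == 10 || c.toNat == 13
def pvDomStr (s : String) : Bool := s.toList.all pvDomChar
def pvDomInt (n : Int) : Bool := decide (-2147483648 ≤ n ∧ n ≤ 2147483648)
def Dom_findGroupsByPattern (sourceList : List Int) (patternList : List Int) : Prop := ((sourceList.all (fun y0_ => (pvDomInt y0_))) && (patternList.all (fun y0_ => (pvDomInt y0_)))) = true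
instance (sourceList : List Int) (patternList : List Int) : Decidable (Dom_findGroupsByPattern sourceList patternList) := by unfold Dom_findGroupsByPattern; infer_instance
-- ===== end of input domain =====

-- B replaces A's per-window string building and string comparison by a direct element-by-element
-- prefix check collecting the occurrence positions first, then groups the gap segments in a
-- separate pass (measured faster by a constant factor; same return value).

-- ===== PORT A =====
-- listToStr: result = ''; for el in scaleList: result += str(el) + ' '
def listToStrA (scaleList : List Int) : String :=
  scaleList.foldl (fun result el => result ++ PySem.Int.toStr el ++ " ") ""

def findGroupsByPattern (sourceList : List Int) (patternList : List Int) : List Int × (List (String × Int)) :=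
  let templateStr := listToStrA patternList
  let st :=
    (PySem.List.pyRange 0 (PySem.List.len sourceList - PySem.List.len patternList) 1).foldl
      (fun (st : List Int × PySem.Dict String Int × Int × Int) i =>
        let groups := st.1
        let groupNumbers := st.2.1
        let groupCounter := st.2.2.1
        let prevBeginInd := st.2.2.2
        let subList := PySem.List.slice sourceList (some i) (some (PySem.List.len patternList + i))
        let subStr := listToStrA subList
        if templateStr == subStr then
          let group := PySem.List.slice sourceList (some prevBeginInd) (some (i - 1))
          let groupStr := listToStrA group
          match groupNumbers.get? groupStr with
          | some v => (groups ++ [v], groupNumbers, groupCounter, i)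
          | none =>
              (groups ++ [groupCounter], groupNumbers.insert groupStr groupCounter,
               groupCounter + 1, i)
        else st)
      ([], PySem.Dict.empty, 0, 0)
  (st.1, st.2.1.items)

-- ===== PORT B =====
-- inner while-loop of Source B: j advances while sourceList[i+j] == patternList[j]
def isPrefixAt (src : List Int) (pat : List Int) (i : Nat) : Bool :=
  match pat with
  | [] => true
  | p :: ps =>
    match src[i]? with
    | some x => x == p && isPrefixAt src ps (i + 1)
    | none => false

def findGroupsByPattern_alt (sourceList : List Int) (patternList : List Int) : List Int × (List (String × Int)) :=
  let n := sourceList.length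
  let m := patternList.length
  let positions := (List.range (n - m)).filter (fun i => isPrefixAt sourceList patternList i)
  let st :=
    positions.foldl
      (fun (st : List Int × PySem.Dict String Int × Nat) (i : Nat) =>
        let groups := st.1
        let groupNumbers := st.2.1
        let prev := st.2.2
        let seg := PySem.List.slice sourceList (some (prev : Int)) (some ((i : Int) - 1))
        let key := String.ofList (seg.flatMap (fun x => PySem.Int.toChars x ++ [' ']))
        let groupNumbers' :=
          if groupNumbers.contains key then groupNumbers
          else groupNumbers.insert key (groupNumbers.size : Int)
        (groups ++ [groupNumbers'.getD key 0], groupNumbers', i))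
      ([], PySem.Dict.empty, 0)
  (st.1, st.2.1.items)

-- ===== PRECONDITION & SPEC =====
def Spec_findGroupsByPattern (sourceList : List Int) (patternList : List Int) (out : List Int × (List (String × Int))) : Prop := out = findGroupsByPattern_alt sourceList patternList
instance (sourceList : List Int) (patternList : List Int) (out : List Int × (List (String × Int))) : Decidable (Spec_findGroupsByPattern sourceList patternList out) := by unfold Spec_findGroupsByPattern; infer_instance

-- ===== CLAIM (what is proved, stated in full; the proofs are below) =====
def Claim_equal_findGroupsByPattern : Prop := ∀ (sourceList : List Int) (patternList : List Int), Dom_findGroupsByPattern sourceList patternList → Spec_findGroupsByPattern sourceList patternList (findGroupsByPattern sourceList patternList)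

-- ===== LEMMAS AND PROOFS =====

-- the character encoding `str(x) + ' '` concatenated over a list (the list side of listToStrA)
def encInts (l : List Int) : List Char := l.flatMap (fun x => PySem.Int.toChars x ++ [' '])

-- named forms of the two loop bodies (definitionally the lambdas inside the ports)
def stepA (src pat : List Int) (st : List Int × PySem.Dict String Int × Int × Int) (i : Int) :
    List Int × PySem.Dict String Int × Int × Int :=
  let groups := st.1
  let groupNumbers := st.2.1
  let groupCounter := st.2.2.1
  let prevBeginInd := st.2.2.2
  let subList := PySem.List.slice src (some i) (some (PySem.List.len pat + i))
  let subStr := listToStrA subList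
  if listToStrA pat == subStr then
    let group := PySem.List.slice src (some prevBeginInd) (some (i - 1))
    let groupStr := listToStrA group
    match groupNumbers.get? groupStr with
    | some v => (groups ++ [v], groupNumbers, groupCounter, i)
    | none =>
        (groups ++ [groupCounter], groupNumbers.insert groupStr groupCounter, groupCounter + 1, i)
  else st

def stepB (src : List Int) (st : List Int × PySem.Dict String Int × Nat) (i : Nat) :
    List Int × PySem.Dict String Int × Nat :=
  let groups := st.1
  let groupNumbers := st.2.1
  let prev := st.2.2
  let seg := PySem.List.slice src (some (prev : Int)) (some ((i : Int) - 1))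
  let key := String.ofList (seg.flatMap (fun x => PySem.Int.toChars x ++ [' ']))
  let groupNumbers' :=
    if groupNumbers.contains key then groupNumbers
    else groupNumbers.insert key (groupNumbers.size : Int)
  (groups ++ [groupNumbers'.getD key 0], groupNumbers', i)

lemma portA_eq (src pat : List Int) :
    findGroupsByPattern src pat =
      (let st := (PySem.List.pyRange 0 (PySem.List.len src - PySem.List.len pat) 1).foldl
          (stepA src pat) ([], PySem.Dict.empty, 0, 0)
       (st.1, st.2.1.items)) := rfl

lemma portB_eq (src pat : List Int) :
    findGroupsByPattern_alt src pat =
      (let st := ((List.range (src.length - pat.length)).filter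
            (fun i => isPrefixAt src pat i)).foldl (stepB src) ([], PySem.Dict.empty, 0)
       (st.1, st.2.1.items)) := rfl

-- digit characters are distinct below 10
lemma digitChar_inj {d e : Nat} (hd : d < 10) (he : e < 10)
    (h : Nat.digitChar d = Nat.digitChar e) : d = e := by
  interval_cases d <;> interval_cases e <;> revert h <;> decide

-- decimal representations of distinct naturals are distinct
lemma toDigits_ten_inj (n : Nat) : ∀ m, Nat.toDigits 10 n = Nat.toDigits 10 m → n = m := by
  induction n using Nat.strong_induction_on with
  | _ n ih =>
    intro m h
    rw [Nat.toDigits_eq_if (by norm_num)] at h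
    rw [Nat.toDigits_eq_if (b := 10) (n := m) (by norm_num)] at h
    split_ifs at h with h1 h2 h2
    · exact digitChar_inj h1 h2 (List.singleton_inj.mp h)
    · have hlen := congrArg List.length h
      simp only [List.length_singleton, List.length_append] at hlen
      have := @Nat.length_toDigits_pos 10 (m / 10)
      omega
    · have hlen := congrArg List.length h
      simp only [List.length_singleton, List.length_append] at hlen
      have := @Nat.length_toDigits_pos 10 (n / 10)
      omega
    · have h' := List.append_inj' h rfl
      have hdiv : n / 10 = m / 10 := ih (n / 10) (Nat.div_lt_self (by omega) (by norm_num)) _ h'.1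
      have hmod : n % 10 = m % 10 :=
        digitChar_inj (Nat.mod_lt _ (by norm_num)) (Nat.mod_lt _ (by norm_num))
          (List.singleton_inj.mp h'.2)
      omega

lemma toChars_inj {n m : Int} (h : PySem.Int.toChars n = PySem.Int.toChars m) : n = m := by
  have hdig : ∀ (k : Nat), ('-' : Char) ∉ Nat.toDigits 10 k := by
    intro k hk
    have := Nat.isDigit_of_mem_toDigits (by norm_num) (by norm_num) hk
    simp [Char.isDigit] at this
  unfold PySem.Int.toChars at h
  split_ifs at h with h1 h2 h2
  · rw [List.cons.injEq] at h
    have := toDigits_ten_inj _ _ h.2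
    omega
  · exact absurd (h ▸ List.mem_cons_self) (hdig _)
  · exact absurd (h.symm ▸ List.mem_cons_self) (hdig _)
  · have := toDigits_ten_inj _ _ h
    omega

lemma space_not_mem_toChars (n : Int) : (' ' : Char) ∉ PySem.Int.toChars n := by
  intro hmem
  have hdig : ∀ (k : Nat), (' ' : Char) ∉ Nat.toDigits 10 k := by
    intro k hk
    have := Nat.isDigit_of_mem_toDigits (by norm_num) (by norm_num) hk
    simp [Char.isDigit] at this
  unfold PySem.Int.toChars at hmem
  split_ifs at hmem with h1
  · rcases List.mem_cons.mp hmem with h | h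
    · exact absurd h (by decide)
    · exact hdig _ h
  · exact hdig _ hmem

-- splitting a char list at the first space
lemma split_at_space : ∀ (a : List Char) (b r s : List Char), (' ' : Char) ∉ a → (' ' : Char) ∉ b →
    a ++ ' ' :: r = b ++ ' ' :: s → a = b ∧ r = s := by
  intro a
  induction a with
  | nil =>
    intro b r s _ hb h
    cases b with
    | nil => simpa using h
    | cons y ys =>
      simp at h
      exact absurd (h.1 ▸ List.mem_cons_self) hb
  | cons x xs ih =>
    intro b r s ha hb h
    cases b with
    | nil =>
      simp at h
      exact absurd (h.1 ▸ List.mem_cons_self) ha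
    | cons y ys =>
      simp at h
      obtain ⟨hxy, h'⟩ := h
      have := ih ys r s (fun hc => ha (List.mem_cons_of_mem _ hc))
        (fun hc => hb (List.mem_cons_of_mem _ hc)) h'
      simp [hxy, this.1, this.2]

lemma encInts_inj : ∀ (xs ys : List Int), encInts xs = encInts ys → xs = ys := by
  intro xs
  induction xs with
  | nil =>
    intro ys h
    cases ys with
    | nil => rfl
    | cons y ys =>
      exfalso
      simp [encInts] at h
  | cons x xs ih =>
    intro ys h
    cases ys with
    | nil =>
      exfalso
      simp [encInts] at h
    | cons y ys =>
      simp only [encInts, List.flatMap_cons, List.append_assoc, List.singleton_append] at h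
      have := split_at_space _ _ _ _ (space_not_mem_toChars x) (space_not_mem_toChars y) h
      have hx := toChars_inj this.1
      have := ih ys this.2
      simp [hx, this]

lemma listToStrA_toList : ∀ (l : List Int) (s : String),
    (l.foldl (fun r e => r ++ PySem.Int.toStr e ++ " ") s).toList = s.toList ++ encInts l := by
  intro l
  induction l with
  | nil => intro s; simp [encInts]
  | cons x xs ih =>
    intro s
    simp only [List.foldl_cons, ih, encInts, List.flatMap_cons, String.toList_append,
      PySem.Int.toList_toStr]
    simp

lemma listToStrA_eq (l : List Int) : listToStrA l = String.ofList (encInts l) := by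
  apply String.toList_inj.mp
  rw [listToStrA, listToStrA_toList]
  simp

lemma listToStrA_inj {xs ys : List Int} (h : listToStrA xs = listToStrA ys) : xs = ys := by
  rw [listToStrA_eq, listToStrA_eq] at h
  have := congrArg String.toList h
  simp only [String.toList_ofList] at this
  exact encInts_inj _ _ this

lemma isPrefixAt_spec : ∀ (pat src : List Int) (i : Nat),
    isPrefixAt src pat i = decide ((src.drop i).take pat.length = pat) := by
  intro pat
  induction pat with
  | nil => intro src i; simp [isPrefixAt]
  | cons p ps ih =>
    intro src i
    rw [isPrefixAt]
    cases hg : src[i]? with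
    | none =>
      have := List.getElem?_eq_none_iff.mp hg
      rw [List.drop_eq_nil_of_le this]
      simp
    | some x =>
      obtain ⟨hi, hx⟩ := List.getElem?_eq_some_iff.mp hg
      have hdrop : src.drop i = x :: src.drop (i + 1) := by
        rw [List.drop_eq_getElem_cons hi, hx]
      rw [hdrop, ih]
      by_cases hxp : x = p
      · simp [hxp]
      · simp [hxp]

-- the state relation between A's loop state and B's loop state
def RelAB (sa : List Int × PySem.Dict String Int × Int × Int)
    (sb : List Int × PySem.Dict String Int × Nat) : Prop :=
  sa.1 = sb.1 ∧ sa.2.1 = sb.2.1 ∧ sa.2.2.1 = (sb.2.1.size : Int) ∧ sa.2.2.2 = (sb.2.2 : Int)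

lemma cond_eq (src pat : List Int) (i : Nat) :
    (listToStrA pat == listToStrA (PySem.List.slice src (some (i : Int))
      (some (PySem.List.len pat + (i : Int))))) = isPrefixAt src pat i := by
  have hb : (PySem.List.len pat + (i : Int)) = ((pat.length + i : Nat) : Int) := by
    simp [PySem.List.len_eq]
  have hs : PySem.List.slice src (some (i : Int)) (some (PySem.List.len pat + (i : Int))) =
      (src.drop i).take pat.length := by
    rw [hb, PySem.List.slice_natCast]
    congr 1
    omega
  rw [hs, isPrefixAt_spec]
  by_cases hpw : (src.drop i).take pat.length = pat
  · simp [hpw]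
  · simp only [hpw, decide_false]
    rw [beq_eq_false_iff_ne]
    intro hc
    exact hpw (listToStrA_inj hc).symm

lemma step_rel (src pat : List Int) (i : Nat)
    (sa : List Int × PySem.Dict String Int × Int × Int)
    (sb : List Int × PySem.Dict String Int × Nat) (hr : RelAB sa sb) :
    RelAB (stepA src pat sa (i : Int))
      (if isPrefixAt src pat i then stepB src sb i else sb) := by
  obtain ⟨g, d, c, p⟩ := sa
  obtain ⟨g', d', p'⟩ := sb
  obtain ⟨h1, h2, h3, h4⟩ := hr
  simp only [RelAB] at h1 h2 h3 h4 ⊢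
  subst h1 h2 h3 h4
  rw [stepA]
  simp only []
  rw [cond_eq src pat i]
  cases hc : isPrefixAt src pat i with
  | false => simp
  | true =>
    rw [stepB]
    simp only []
    have hkey : listToStrA (PySem.List.slice src (some ((p' : Nat) : Int)) (some ((i : Int) - 1)))
        = String.ofList ((PySem.List.slice src (some ((p' : Nat) : Int))
            (some ((i : Int) - 1))).flatMap (fun x => PySem.Int.toChars x ++ [' '])) := by
      rw [listToStrA_eq]; rfl
    rw [hkey]
    set key := String.ofList ((PySem.List.slice src (some ((p' : Nat) : Int))
        (some ((i : Int) - 1))).flatMap (fun x => PySem.Int.toChars x ++ [' '])) with hk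
    cases hget : d.get? key with
    | some v =>
      have hcon : d.contains key = true := by
        rw [PySem.Dict.contains_eq_isSome_get?, hget]; rfl
      simp [hcon, PySem.Dict.getD_of_get?_eq_some _ _ hget]
    | none =>
      have hcon : d.contains key = false := by
        rw [PySem.Dict.contains_eq_isSome_get?, hget]; rfl
      simp [hcon, PySem.Dict.getD_insert_self, PySem.Dict.size_insert]

lemma loop_rel (src pat : List Int) : ∀ (l : List Nat)
    (sa : List Int × PySem.Dict String Int × Int × Int)
    (sb : List Int × PySem.Dict String Int × Nat),
    RelAB sa sb →
    RelAB (l.foldl (fun s k => stepA src pat s (k : Int)) sa)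
      (l.foldl (fun s k => if isPrefixAt src pat k then stepB src s k else s) sb) := by
  intro l
  induction l with
  | nil => intro sa sb hr; exact hr
  | cons x xs ih =>
    intro sa sb hr
    simp only [List.foldl_cons]
    exact ih _ _ (step_rel src pat x sa sb hr)

-- ===== VERDICT (by name: the statement is the Claim_ definition above) =====
theorem findGroupsByPattern_spec : Claim_equal_findGroupsByPattern := by
  intro src pat _
  unfold Spec_findGroupsByPattern
  rw [portA_eq, portB_eq]
  simp only []
  have hrange : PySem.List.pyRange 0 (PySem.List.len src - PySem.List.len pat) 1 =
      (List.range (src.length - pat.length)).map (fun k => (k : Int)) := by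
    rw [PySem.List.pyRange_one]
    have : ((PySem.List.len src - PySem.List.len pat) - 0).toNat = src.length - pat.length := by
      simp [PySem.List.len_eq]
    rw [this]
    simp only [zero_add]
    simp [List.map_eq_flatMap]
  rw [hrange, List.foldl_map, List.foldl_filter]
  have hrel := loop_rel src pat (List.range (src.length - pat.length))
    ([], PySem.Dict.empty, 0, 0) ([], PySem.Dict.empty, 0)
    (by simp [RelAB])
  obtain ⟨h1, h2, _, _⟩ := hrel
  rw [Prod.ext_iff]
  exact ⟨h1, by rw [h2]⟩
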